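-- pv_equiv track=rewrite | github.com/carokaffee/AdventOfCode2023 | src/solutions/day07.py | sort_by_category
-- ===== SOURCE A (Python) =====
-- from collections import Counter
--
-- CATEGORIES = ("five", "four", "fullhouse", "three", "twopairs", "onepair", "high")
--
-- def sort_by_category(hands):
--     categorised_hands = {category: [] for category in CATEGORIES}
--     for hand in hands:
--         cards, _ = hand
--         cropped_cards = cards[:5]
--         counts = dict(Counter(cropped_cards))
--         vals = list(counts.values())
--         if 5 in vals:
--             categorised_hands["five"].append(hand)
--         elif 4 in vals:
--             categorised_hands["four"].append(hand)
--         elif 3 in vals and 2 in vals: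
--             categorised_hands["fullhouse"].append(hand)
--         elif 3 in vals:
--             categorised_hands["three"].append(hand)
--         elif vals.count(2) == 2:
--             categorised_hands["twopairs"].append(hand)
--         elif 2 in vals:
--             categorised_hands["onepair"].append(hand)
--         else:
--             categorised_hands["high"].append(hand)
--     return categorised_hands
-- ===== SOURCE B (Python) =====
-- CATEGORIES = ("five", "four", "fullhouse", "three", "twopairs", "onepair", "high")
--
-- def _category(cards):
--     cropped = cards[:5]
--     distinct = set(cropped)
--     m = max((cropped.count(x) for x in distinct), default=0)
--     r = len(cropped) - len(distinct)  # total excess multiplicity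
--     if m == 5:
--         return "five"
--     if m == 4:
--         return "four"
--     if m == 3:
--         return "fullhouse" if r == 3 else "three"
--     if m == 2:
--         return "twopairs" if r == 2 else "onepair"
--     return "high"
--
-- def sort_by_category(hands):
--     return {cat: [hand for hand in hands if _category(hand[0]) == cat]
--             for cat in CATEGORIES}
-- ===== Notes on version B (the rewrite author's own statement) =====
-- stated objective: simpler
-- what changed: Replaces the single-pass dict-bucket accumulation and six membership/count probes on the Counter values by seven staged filter passes (a dict comprehension of filters) whose classifier is plain arithmetic on the maximum multiplicity and the number of distinct cards, with no Counter values list at all.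
import Mathlib
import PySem

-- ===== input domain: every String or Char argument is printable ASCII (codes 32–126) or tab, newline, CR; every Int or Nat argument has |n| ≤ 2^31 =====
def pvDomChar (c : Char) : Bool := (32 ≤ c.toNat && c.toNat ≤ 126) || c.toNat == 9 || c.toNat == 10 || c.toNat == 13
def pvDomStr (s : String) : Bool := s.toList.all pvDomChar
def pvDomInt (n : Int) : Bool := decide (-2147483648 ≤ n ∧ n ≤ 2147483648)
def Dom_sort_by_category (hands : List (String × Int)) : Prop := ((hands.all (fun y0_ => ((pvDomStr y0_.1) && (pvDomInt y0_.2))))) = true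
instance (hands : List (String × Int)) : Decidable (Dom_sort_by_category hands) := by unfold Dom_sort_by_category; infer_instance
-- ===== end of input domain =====

-- B replaces A's one-pass bucket accumulation with a dict comprehension of seven filter
-- passes, classifying each hand by arithmetic on its maximum card multiplicity and its
-- number of distinct cards instead of probing the Counter values list (objective: simpler).

-- ===== PORT A =====
def CATEGORIES : List String := ["five", "four", "fullhouse", "three", "twopairs", "onepair", "high"]

-- literal transliteration of A; `dict(Counter(x)).values()` has the same values list as
-- `Counter(x)` itself, ported as (PySem.Dict.counter x).values
def sort_by_category (hands : List (String × Int)) : List (String × List (String × Int)) :=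
  let categorised_hands : PySem.Dict String (List (String × Int)) :=
    CATEGORIES.foldl (fun d category => d.insert category []) PySem.Dict.empty
  (hands.foldl (fun categorised_hands hand =>
      let cards := hand.1
      let cropped_cards := PySem.List.slice cards.toList none (some 5)
      let vals := (PySem.Dict.counter cropped_cards).values
      if (5 : Int) ∈ vals then categorised_hands.modify "five" [] (· ++ [hand])
      else if (4 : Int) ∈ vals then categorised_hands.modify "four" [] (· ++ [hand])
      else if (3 : Int) ∈ vals ∧ (2 : Int) ∈ vals then categorised_hands.modify "fullhouse" [] (· ++ [hand])
      else if (3 : Int) ∈ vals then categorised_hands.modify "three" [] (· ++ [hand])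
      else if vals.count 2 = 2 then categorised_hands.modify "twopairs" [] (· ++ [hand])
      else if (2 : Int) ∈ vals then categorised_hands.modify "onepair" [] (· ++ [hand])
      else categorised_hands.modify "high" [] (· ++ [hand]))
    categorised_hands).items

-- ===== PORT B =====
-- max(counts, default=0) is PySem.List.maxD; len(cropped) - len(distinct) is the excess multiplicity
def pvCategory (cards : String) : String :=
  let cropped := PySem.List.slice cards.toList none (some 5)
  let distinct := PySem.Set.ofList cropped
  let m : Int := PySem.List.maxD (distinct.map (fun x => (cropped.count x : Int))) (fun y => y) 0
  let r : Int := (cropped.length : Int) - (distinct.length : Int)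
  if m = 5 then "five"
  else if m = 4 then "four"
  else if m = 3 then (if r = 3 then "fullhouse" else "three")
  else if m = 2 then (if r = 2 then "twopairs" else "onepair")
  else "high"

-- the dict comprehension over the distinct literal keys CATEGORIES is this association list
def sort_by_category_alt (hands : List (String × Int)) : List (String × List (String × Int)) :=
  CATEGORIES.map (fun cat => (cat, hands.filter (fun hand => pvCategory hand.1 == cat)))

-- ===== PRECONDITION & SPEC =====
def Spec_sort_by_category (hands : List (String × Int)) (out : List (String × List (String × Int))) : Prop := out = sort_by_category_alt hands
instance (hands : List (String × Int)) (out : List (String × List (String × Int))) : Decidable (Spec_sort_by_category hands out) := by unfold Spec_sort_by_category; infer_instance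

-- ===== CLAIM (what is proved, stated in full; the proofs are below) =====
def Claim_equal_sort_by_category : Prop := ∀ (hands : List (String × Int)), Dom_sort_by_category hands → Spec_sort_by_category hands (sort_by_category hands)

-- ===== LEMMAS AND PROOFS =====

-- A's classification chain as a function of the Counter values list
def pvChainCat (vals : List Int) : String :=
  if (5 : Int) ∈ vals then "five"
  else if (4 : Int) ∈ vals then "four"
  else if (3 : Int) ∈ vals ∧ (2 : Int) ∈ vals then "fullhouse"
  else if (3 : Int) ∈ vals then "three"
  else if vals.count 2 = 2 then "twopairs"
  else if (2 : Int) ∈ vals then "onepair"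
  else "high"

def pvValsOf (cards : String) : List Int :=
  (PySem.Dict.counter (PySem.List.slice cards.toList none (some 5))).values

def pvKeyA (hand : String × Int) : String := pvChainCat (pvValsOf hand.1)

-- each element of a positive list is at most the list's sum
lemma pv_le_sum (t : List Int) (htpos : ∀ x ∈ t, 1 ≤ x) (x : Int) (hx : x ∈ t) : x ≤ t.sum :=
  List.single_le_sum (fun y hy => le_trans zero_le_one (htpos y hy)) x hx

-- sum and length of a list with entries in {1,2,3}, decomposed by counts
lemma pv_count_decomp (l : List Int) (h : ∀ x ∈ l, 1 ≤ x ∧ x ≤ 3) :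
    l.sum = (l.count 1 : Int) + 2 * l.count 2 + 3 * l.count 3 ∧
    (l.length : Int) = (l.count 1 : Int) + l.count 2 + l.count 3 := by
  induction l with
  | nil => simp
  | cons x t ih =>
    obtain ⟨h1, h3⟩ := h x (by simp)
    obtain ⟨ihs, ihl⟩ := ih (fun y hy => h y (by simp [hy]))
    have hx : x = 1 ∨ x = 2 ∨ x = 3 := by omega
    rcases hx with rfl | rfl | rfl <;>
      simp [ihs] <;> omega


-- A's membership chain equals B's (max multiplicity, excess) arithmetic on any
-- positive values list of sum ≤ 5
lemma pv_core (l : List Int) (hpos : ∀ x ∈ l, 1 ≤ x) (hsum : l.sum ≤ 5) :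
    pvChainCat l =
    (if (PySem.List.max? l (fun y => y)).getD 0 = 5 then "five"
     else if (PySem.List.max? l (fun y => y)).getD 0 = 4 then "four"
     else if (PySem.List.max? l (fun y => y)).getD 0 = 3 then
       (if l.sum - (l.length : Int) = 3 then "fullhouse" else "three")
     else if (PySem.List.max? l (fun y => y)).getD 0 = 2 then
       (if l.sum - (l.length : Int) = 2 then "twopairs" else "onepair")
     else "high") := by
  unfold pvChainCat
  cases hl : PySem.List.max? l (fun y => y) with
  | none =>
    rw [PySem.List.max?_eq_none_iff] at hl
    subst hl; simp
  | some m0 =>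
    have hmem : m0 ∈ l := PySem.List.max?_mem hl
    have hmax : ∀ y ∈ l, y ≤ m0 := PySem.List.max?_isMax hl
    have h1 : 1 ≤ m0 := hpos m0 hmem
    have h5 : m0 ≤ 5 := le_trans (pv_le_sum l hpos m0 hmem) hsum
    simp only [Option.getD_some]
    have hm : m0 = 1 ∨ m0 = 2 ∨ m0 = 3 ∨ m0 = 4 ∨ m0 = 5 := by omega
    rcases hm with rfl | rfl | rfl | rfl | rfl
    · -- max 1: no multiplicity ≥ 2 occurs
      have hn : ∀ k : Int, 2 ≤ k → k ∉ l := fun k hk hmm => by have := hmax k hmm; omega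
      have hc : l.count 2 = 0 := List.count_eq_zero.mpr (hn 2 le_rfl)
      simp [hn 5 (by norm_num), hn 4 (by norm_num), hn 3 (by norm_num),
        hn 2 (by norm_num), hc]
    · -- max 2: the 2s are exactly the excess
      have hn : ∀ k : Int, 3 ≤ k → k ∉ l := fun k hk hmm => by have := hmax k hmm; omega
      obtain ⟨hs, hlen⟩ := pv_count_decomp l
        (fun x hx => ⟨hpos x hx, by have := hmax x hx; omega⟩)
      have hc3 : l.count 3 = 0 := List.count_eq_zero.mpr (hn 3 le_rfl)
      by_cases hc : l.count 2 = 2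
      · have hr : l.sum - (l.length : Int) = 2 := by
          rw [hs, hlen, hc3, hc]; push_cast; ring
        simp [hn 5 (by norm_num), hn 4 (by norm_num), hn 3 (by norm_num), hc, hr]
      · have hr : l.sum - (l.length : Int) ≠ 2 := by
          rw [hs, hlen, hc3]
          intro h
          apply hc
          omega
        simp [hn 5 (by norm_num), hn 4 (by norm_num), hn 3 (by norm_num), hc, hr, hmem]
    · -- max 3: a 2 occurs iff the excess is 3
      have hn : ∀ k : Int, 4 ≤ k → k ∉ l := fun k hk hmm => by have := hmax k hmm; omega
      obtain ⟨hs, hlen⟩ := pv_count_decomp l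
        (fun x hx => ⟨hpos x hx, by have := hmax x hx; omega⟩)
      have hc3 : 0 < l.count 3 := List.count_pos_iff.mpr hmem
      have hc3' : l.count 3 = 1 := by omega
      by_cases h2 : (2 : Int) ∈ l
      · have hc2 : 0 < l.count 2 := List.count_pos_iff.mpr h2
        have hc2' : l.count 2 = 1 := by omega
        have hr : l.sum - (l.length : Int) = 3 := by
          rw [hs, hlen, hc3', hc2']; push_cast; ring
        simp [hn 5 (by norm_num), hn 4 (by norm_num), hmem, h2, hr]
      · have hc2 : l.count 2 = 0 := List.count_eq_zero.mpr h2
        have hr : l.sum - (l.length : Int) ≠ 3 := by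
          rw [hs, hlen, hc3', hc2]
          push_cast
          omega
        simp [hn 5 (by norm_num), hn 4 (by norm_num), hmem, h2, hr]
    · -- max 4
      have hn : (5 : Int) ∉ l := fun hmm => by have := hmax 5 hmm; omega
      simp [hn, hmem]
    · -- max 5
      simp [hmem]

-- the Counter values list, written over the distinct elements
lemma pv_values_counter (s : List Char) :
    (PySem.Dict.counter s).values
      = (PySem.Set.ofList s).map (fun k => ((s.count k : Nat) : Int)) := by
  show ((PySem.Dict.counter s).items.map (fun p => p.2)) = _
  rw [PySem.Dict.items_counter]
  simp [List.map_map, Function.comp]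

-- values of a Counter are each ≥ 1
lemma pv_vals_pos (s : List Char) : ∀ x ∈ (PySem.Dict.counter s).values, (1 : Int) ≤ x := by
  intro x hx
  rw [pv_values_counter] at hx
  simp only [List.mem_map] at hx
  obtain ⟨k, hk, rfl⟩ := hx
  have hk' : k ∈ s := (PySem.Set.mem_ofList s k).mp hk
  exact_mod_cast List.count_pos_iff.mpr hk'

-- values of a Counter sum to the length of the counted list
lemma pv_vals_sum (s : List Char) : ((PySem.Dict.counter s).values).sum = (s.length : Int) := by
  have hperm : (PySem.Set.ofList s).Perm s.dedup := by
    rw [List.perm_ext_iff_of_nodup (PySem.Set.nodup_ofList s) s.nodup_dedup]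
    intro a; simp [PySem.Set.mem_ofList, List.mem_dedup]
  have hcast : ∀ l : List Char, (l.map (fun k => ((s.count k : Nat) : Int))).sum
      = ((l.map (fun k => s.count k)).sum : Int) := by
    intro l
    induction l with
    | nil => simp
    | cons y l ih => simp [ih]
  rw [pv_values_counter, (hperm.map (fun k => ((s.count k : Nat) : Int))).sum_eq, hcast,
    List.sum_map_count_dedup_eq_length]

-- pvCategory computed from the Counter values list
lemma pv_cat_eq (hand : String × Int) : pvKeyA hand = pvCategory hand.1 := by
  unfold pvKeyA pvValsOf pvCategory
  set s := PySem.List.slice hand.1.toList none (some 5) with hsdef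
  have hlen5 : s.length ≤ 5 := by
    rw [hsdef, PySem.List.slice_to hand.1.toList (b := 5) (by norm_num)]
    simp
  have hvals : (PySem.Set.ofList s).map (fun x => ((s.count x : Nat) : Int))
      = (PySem.Dict.counter s).values := (pv_values_counter s).symm
  simp only [PySem.List.maxD]
  rw [hvals]
  have hlen : ((PySem.Set.ofList s).length : Int)
      = (((PySem.Dict.counter s).values).length : Int) := by
    rw [← hvals]; simp
  rw [hlen]
  have hr : (s.length : Int) - (((PySem.Dict.counter s).values).length : Int)
      = ((PySem.Dict.counter s).values).sum - (((PySem.Dict.counter s).values).length : Int) := by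
    rw [pv_vals_sum]
  rw [hr]
  exact pv_core ((PySem.Dict.counter s).values) (pv_vals_pos s)
    (by rw [pv_vals_sum]; omega)

-- one loop iteration of A is a modify at the classified key
lemma pv_step_eq (d : PySem.Dict String (List (String × Int))) (hand : String × Int) :
    (let cards := hand.1
     let cropped_cards := PySem.List.slice cards.toList none (some 5)
     let vals := (PySem.Dict.counter cropped_cards).values
     if (5 : Int) ∈ vals then d.modify "five" [] (· ++ [hand])
     else if (4 : Int) ∈ vals then d.modify "four" [] (· ++ [hand])
     else if (3 : Int) ∈ vals ∧ (2 : Int) ∈ vals then d.modify "fullhouse" [] (· ++ [hand])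
     else if (3 : Int) ∈ vals then d.modify "three" [] (· ++ [hand])
     else if vals.count 2 = 2 then d.modify "twopairs" [] (· ++ [hand])
     else if (2 : Int) ∈ vals then d.modify "onepair" [] (· ++ [hand])
     else d.modify "high" [] (· ++ [hand]))
    = d.modify (pvKeyA hand) [] (· ++ [hand]) := by
  set vals := pvValsOf hand.1 with hv
  set m : String → PySem.Dict String (List (String × Int)) := fun c => d.modify c [] (· ++ [hand]) with hm
  show (if (5 : Int) ∈ vals then m "five" else if (4 : Int) ∈ vals then m "four"
    else if (3 : Int) ∈ vals ∧ (2 : Int) ∈ vals then m "fullhouse"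
    else if (3 : Int) ∈ vals then m "three" else if vals.count 2 = 2 then m "twopairs"
    else if (2 : Int) ∈ vals then m "onepair" else m "high") = m (pvKeyA hand)
  rw [← apply_ite m ((2 : Int) ∈ vals) "onepair" "high",
      ← apply_ite m (vals.count 2 = 2) "twopairs" _,
      ← apply_ite m ((3 : Int) ∈ vals) "three" _,
      ← apply_ite m ((3 : Int) ∈ vals ∧ (2 : Int) ∈ vals) "fullhouse" _,
      ← apply_ite m ((4 : Int) ∈ vals) "four" _,
      ← apply_ite m ((5 : Int) ∈ vals) "five" _]
  rfl

-- adding already-present elements leaves a set unchanged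
lemma pv_update_of_mem (l : List String) (s : PySem.Set String) (h : ∀ x ∈ l, x ∈ s) :
    PySem.Set.update s l = s := by
  rw [PySem.Set.update_eq_append_filter]
  have hf : (PySem.Set.ofList l).filter (fun y => !(PySem.Set.contains s y)) = [] := by
    rw [List.filter_eq_nil_iff]
    intro y hy
    simp [h y ((PySem.Set.mem_ofList l y).mp hy)]
  rw [hf, List.append_nil]

-- every classification lands in CATEGORIES
lemma pv_keyA_mem (hand : String × Int) : pvKeyA hand ∈ CATEGORIES := by
  unfold pvKeyA pvChainCat CATEGORIES
  split_ifs <;> simp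

-- the initial dict maps every key to []
lemma pv_getD_init (c : String) :
    (CATEGORIES.foldl (fun d category => d.insert category []) PySem.Dict.empty).getD c
      ([] : List (String × Int)) = [] := by
  unfold CATEGORIES
  simp only [List.foldl]
  simp only [PySem.Dict.getD_insert]
  split_ifs <;> simp [PySem.Dict.getD_empty]

-- projecting the pairing away again is the plain filter
lemma pv_filter_pair (c : String) (hands : List (String × Int)) :
    List.map ((fun x => x.2) ∘ fun h => (pvKeyA h, h))
      (hands.filter ((fun p => p.1 == c) ∘ fun h => (pvKeyA h, h))) =
    hands.filter (fun h => pvKeyA h == c) := by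
  induction hands with
  | nil => rfl
  | cons h t ih => by_cases hc : pvKeyA h == c <;> simp [hc, ih]

-- A's result, characterised as the seven filters
lemma pv_A_items (hands : List (String × Int)) :
    sort_by_category hands =
    CATEGORIES.map (fun c => (c, hands.filter (fun h => pvKeyA h == c))) := by
  unfold sort_by_category
  refine Eq.trans (congrArg PySem.Dict.items
    (PySem.List.foldl_congr_mem hands _ (fun d h => d.modify (pvKeyA h) [] (· ++ [h])) _
      (fun d hand _ => pv_step_eq d hand))) ?_
  set d0 := CATEGORIES.foldl (fun d category => d.insert category []) PySem.Dict.empty with hd0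
  have hkeys : (hands.foldl (fun d h => d.modify (pvKeyA h) [] (· ++ [h])) d0).keys
      = CATEGORIES := by
    rw [PySem.Dict.keys_foldl_modify_key hands pvKeyA [] (fun _ h => (· ++ [h])) d0]
    have hk0 : d0.keys = CATEGORIES := by decide
    rw [hk0, pv_update_of_mem]
    intro x hx
    obtain ⟨h, _, rfl⟩ := List.mem_map.mp hx
    exact pv_keyA_mem h
  rw [PySem.Dict.items_eq_map_keys _ (by rw [hkeys]; decide) [], hkeys]
  apply List.map_congr_left
  intro c _
  have hfm : (hands.foldl (fun d h => d.modify (pvKeyA h) [] (· ++ [h])) d0)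
      = ((hands.map (fun h => (pvKeyA h, h))).foldl
          (fun d p => d.modify p.1 [] (· ++ [p.2])) d0) := by
    rw [List.foldl_map]
  rw [hfm, PySem.Dict.getD_foldl_modify_append, pv_getD_init, List.filter_map]
  rw [List.nil_append, List.map_map]
  exact congrArg (fun l => (c, l)) (pv_filter_pair c hands)

-- ===== VERDICT (by name: the statement is the Claim_ definition above) =====
theorem sort_by_category_spec : Claim_equal_sort_by_category := by
  intro hands _
  unfold Spec_sort_by_category sort_by_category_alt
  rw [pv_A_items]
  apply List.map_congr_left
  intro c _
  simp only [pv_cat_eq]
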